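-- pv_equiv track=rewrite | github.com/SergioGM08/DIAL-22-23 | Práctica 4 buenas/DIAL_Practica_4_1.py | procesos
-- ===== SOURCE A (Python) =====
-- def procesos(T):
--     n = len(T)
--     sol = [0] * n
--     Tiempo_total = 0
--     i = 0
--     for valor, ind in sorted([(T[i], i) for i in range(n)]) :
--         Tiempo_total += (n-ind+1)*T[ind]
--         sol[i] = ind
--         i += 1
--     return sol,Tiempo_total
-- ===== SOURCE B (Python) =====
-- def procesos(T):
--     n = len(T)
--
--     def merge(xs, ys):
--         res = []
--         a, b = 0, 0
--         while a < len(xs) and b < len(ys):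
--             i, j = xs[a], ys[b]
--             if T[i] < T[j] or (T[i] == T[j] and i < j):
--                 res.append(i)
--                 a += 1
--             else:
--                 res.append(j)
--                 b += 1
--         res.extend(xs[a:])
--         res.extend(ys[b:])
--         return res
--
--     def msort(idx):
--         if len(idx) <= 1:
--             return idx
--         m = len(idx) // 2
--         return merge(msort(idx[:m]), msort(idx[m:]))
--
--     sol = msort(list(range(n)))
--     total = 0
--     for i, t in enumerate(T):
--         total += (n - i + 1) * t
--     return sol, total
-- ===== Notes on version B (the rewrite author's own statement) =====
-- stated objective: alternative
-- what changed: B never builds or sorts a list of (value,index) tuples: it computes the schedule by a hand-written top-down merge sort over the index list with the comparator T[i]<T[j] or (T[i]==T[j] and i<j), and accumulates the weighted total in a separate sort-free enumerate loop (the sum is order-independent), whereas A calls sorted() on tuple pairs and fuses the total into that sorted loop.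
import Mathlib
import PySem

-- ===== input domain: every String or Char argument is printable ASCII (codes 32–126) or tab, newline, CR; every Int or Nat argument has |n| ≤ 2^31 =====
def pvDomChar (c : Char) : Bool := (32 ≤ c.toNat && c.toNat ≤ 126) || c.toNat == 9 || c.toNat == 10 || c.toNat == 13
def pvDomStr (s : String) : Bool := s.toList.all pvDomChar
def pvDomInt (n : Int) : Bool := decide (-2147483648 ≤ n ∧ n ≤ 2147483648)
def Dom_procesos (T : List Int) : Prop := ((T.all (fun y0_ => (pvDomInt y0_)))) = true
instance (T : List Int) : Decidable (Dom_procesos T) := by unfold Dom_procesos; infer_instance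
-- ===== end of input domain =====

-- B computes the same (schedule order, weighted total time) pair as A, but by a hand-written
-- merge sort over the index list (comparator T[i]<T[j] or tie-broken by index) instead of A's
-- sorted() call over (value,index) tuples, and the order-independent weighted total in a
-- separate sort-free loop over enumerate(T) (objective: alternative algorithm).


-- ===== PORT A =====
-- one loop step of A: sol[i] = ind; Tiempo_total += (n-ind+1)*T[ind]; i += 1
-- (Python's position i is ported as a Nat counter; it runs 0..n-1, always in range,
--  and List.set at an in-range Nat index is exactly Python's sol[i] = ind there)
def procesosStep (T : List Int) (n : Int) (st : List Int × Int × Nat) (p : Int × Int) : List Int × Int × Nat :=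
  (st.1.set st.2.2 p.2, st.2.1 + (n - p.2 + 1) * PySem.List.pyGetD T p.2 0, st.2.2 + 1)

def procesos (T : List Int) : List Int × Int :=
  let n : Int := (T.length : Int)
  let pairs := (PySem.List.pyRange 0 n 1).map (fun i => (PySem.List.pyGetD T i 0, i))
  let r := (PySem.List.sorted2 pairs (·.1) (·.2)).foldl (procesosStep T n) (List.replicate T.length 0, 0, 0)
  (r.1, r.2.1)

-- ===== PORT B =====
-- B's comparator: T[i] < T[j] or (T[i] == T[j] and i < j); indices produced by range(n) are
-- in range, so T[i] is PySem.List.pyGetD T i 0 there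
def bLt (T : List Int) (i j : Int) : Bool :=
  decide (PySem.List.pyGetD T i 0 < PySem.List.pyGetD T j 0) ||
    (PySem.List.pyGetD T i 0 == PySem.List.pyGetD T j 0 && decide (i < j))

-- Source B's merge: the while loop consuming the smaller head, then the two extends of the tails
def bMerge (T : List Int) : List Int → List Int → List Int
  | [], ys => ys
  | x :: xs, [] => x :: xs
  | i :: xs, j :: ys =>
      if bLt T i j then i :: bMerge T xs (j :: ys) else j :: bMerge T (i :: xs) ys

-- Source B's msort: split at len//2, sort the halves, merge
def bMsort (T : List Int) (idx : List Int) : List Int :=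
  if idx.length ≤ 1 then idx
  else
    let m := idx.length / 2
    bMerge T (bMsort T (idx.take m)) (bMsort T (idx.drop m))
termination_by idx.length
decreasing_by
  · simp only [List.length_take]; omega
  · simp only [List.length_drop]; omega

def procesos_alt (T : List Int) : List Int × Int :=
  let n : Int := (T.length : Int)
  let sol := bMsort T (PySem.List.pyRange 0 n 1)
  let total := (PySem.List.enumerate T 0).foldl (fun acc p => acc + (n - p.1 + 1) * p.2) 0
  (sol, total)

-- ===== PRECONDITION & SPEC =====
def Spec_procesos (T : List Int) (out : List Int × Int) : Prop := out = procesos_alt T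
instance (T : List Int) (out : List Int × Int) : Decidable (Spec_procesos T out) := by unfold Spec_procesos; infer_instance

-- ===== CLAIM (what is proved, stated in full; the proofs are below) =====
def Claim_equal_procesos : Prop := ∀ (T : List Int), Dom_procesos T → Spec_procesos T (procesos T)

-- ===== LEMMAS AND PROOFS =====

-- the (non-strict) key order on indices: (T[i], i) ≤lex (T[j], j)
def leI (T : List Int) (i j : Int) : Prop :=
  PySem.List.pyGetD T i 0 < PySem.List.pyGetD T j 0 ∨
    (PySem.List.pyGetD T i 0 = PySem.List.pyGetD T j 0 ∧ i ≤ j)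

theorem leI_trans (T : List Int) {i j k : Int} (h1 : leI T i j) (h2 : leI T j k) : leI T i k := by
  unfold leI at *; omega

theorem leI_antisymm (T : List Int) {i j : Int} (h1 : leI T i j) (h2 : leI T j i) : i = j := by
  unfold leI at *; omega

theorem bLt_le {T : List Int} {i j : Int} (h : bLt T i j = true) : leI T i j := by
  unfold bLt at h; unfold leI
  rcases Bool.or_eq_true_iff.mp h with h' | h'
  · left; exact of_decide_eq_true h'
  · rcases Bool.and_eq_true_iff.mp h' with ⟨h1, h2⟩
    right; exact ⟨by exact_mod_cast of_decide_eq_true (by simpa using h1), le_of_lt (of_decide_eq_true h2)⟩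

theorem bLt_false_le {T : List Int} {i j : Int} (h : bLt T i j = false) : leI T j i := by
  unfold bLt at h; unfold leI
  simp only [Bool.or_eq_false_iff, Bool.and_eq_false_iff, decide_eq_false_iff_not, beq_eq_false_iff_ne] at h
  omega

theorem bMerge_perm (T : List Int) : ∀ (xs ys : List Int), (bMerge T xs ys).Perm (xs ++ ys)
  | [], ys => by simp [bMerge]
  | x :: xs, [] => by simp [bMerge]
  | i :: xs, j :: ys => by
    rw [bMerge]
    split
    · exact ((bMerge_perm T xs (j :: ys)).cons i)
    · have h1 : (j :: bMerge T (i :: xs) ys).Perm (j :: (i :: xs ++ ys)) :=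
        (bMerge_perm T (i :: xs) ys).cons j
      have h2 : (j :: (i :: xs ++ ys)).Perm ((i :: xs) ++ (j :: ys)) := by
        simpa using (List.Perm.symm (List.perm_middle (a := j) (l₁ := i :: xs) (l₂ := ys)))
      exact h1.trans h2
termination_by xs ys => xs.length + ys.length

theorem bMerge_sorted (T : List Int) : ∀ (xs ys : List Int),
    xs.Pairwise (leI T) → ys.Pairwise (leI T) → (bMerge T xs ys).Pairwise (leI T)
  | [], ys, _, hy => by simpa [bMerge] using hy
  | x :: xs, [], hx, _ => by simpa [bMerge] using hx
  | i :: xs, j :: ys, hx, hy => by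
    rw [bMerge]
    have hxi := (List.pairwise_cons.mp hx).1
    have hxs := (List.pairwise_cons.mp hx).2
    have hyj := (List.pairwise_cons.mp hy).1
    have hys := (List.pairwise_cons.mp hy).2
    split
    · rename_i hlt
      refine List.pairwise_cons.mpr ⟨?_, bMerge_sorted T xs (j :: ys) hxs hy⟩
      intro z hz
      have hz' := (bMerge_perm T xs (j :: ys)).mem_iff.mp hz
      rcases List.mem_append.mp hz' with h | h
      · exact hxi z h
      · rcases List.mem_cons.mp h with h | h
        · subst h; exact bLt_le hlt
        · exact leI_trans T (bLt_le hlt) (hyj z h)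
    · rename_i hlt
      have hji : leI T j i := bLt_false_le (by simpa using hlt)
      refine List.pairwise_cons.mpr ⟨?_, bMerge_sorted T (i :: xs) ys hx hys⟩
      intro z hz
      have hz' := (bMerge_perm T (i :: xs) ys).mem_iff.mp hz
      rcases List.mem_append.mp hz' with h | h
      · rcases List.mem_cons.mp h with h | h
        · subst h; exact hji
        · exact leI_trans T hji (hxi z h)
      · exact hyj z h
termination_by xs ys => xs.length + ys.length

theorem bMsort_perm (T : List Int) (idx : List Int) : (bMsort T idx).Perm idx := by
  fun_induction bMsort T idx with
  | case1 idx h => exact List.Perm.refl idx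
  | case2 idx h m ih1 ih2 =>
    have h1 : (bMerge T (bMsort T (idx.take m)) (bMsort T (idx.drop m))).Perm
        (bMsort T (idx.take m) ++ bMsort T (idx.drop m)) := bMerge_perm T _ _
    have h2 : (bMsort T (idx.take m) ++ bMsort T (idx.drop m)).Perm (idx.take m ++ idx.drop m) :=
      ih1.append ih2
    have h3 : idx.take m ++ idx.drop m = idx := List.take_append_drop m idx
    exact (h1.trans h2).trans (List.Perm.of_eq h3)

theorem bMsort_sorted (T : List Int) (idx : List Int) : (bMsort T idx).Pairwise (leI T) := by
  fun_induction bMsort T idx with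
  | case1 idx h =>
    match idx, h with
    | [], _ => exact List.Pairwise.nil
    | [x], _ => simp
  | case2 idx h m ih1 ih2 => exact bMerge_sorted T _ _ ih1 ih2

-- ----- A side: the sorted2 insertion fold is pairwise-ordered by the pair order -----

-- the (non-strict) lexicographic order on (value, index) pairs
def leP (p q : Int × Int) : Prop := p.1 < q.1 ∨ (p.1 = q.1 ∧ p.2 ≤ q.2)

theorem leP_trans {p q r : Int × Int} (h1 : leP p q) (h2 : leP q r) : leP p r := by
  unfold leP at *; omega

def lt2 (a b : Int × Int) : Bool :=
  decide (a.1 < b.1) || (!decide (b.1 < a.1) && decide (a.2 < b.2))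

theorem lt2_true_leP {a b : Int × Int} (h : lt2 a b = true) : leP a b := by
  unfold lt2 at h; unfold leP
  simp only [Bool.or_eq_true_iff, Bool.and_eq_true_iff, Bool.not_eq_true', decide_eq_true_eq,
    decide_eq_false_iff_not] at h
  omega

theorem lt2_false_leP {a b : Int × Int} (h : lt2 a b = false) : leP b a := by
  unfold lt2 at h; unfold leP
  simp only [Bool.or_eq_false_iff, Bool.and_eq_false_iff, Bool.not_eq_false', decide_eq_true_eq,
    decide_eq_false_iff_not] at h
  omega

theorem insertBy_lt2_pairwise (x : Int × Int) :
    ∀ (ys : List (Int × Int)), ys.Pairwise leP → (PySem.List.insertBy lt2 x ys).Pairwise leP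
  | [], _ => by simp [PySem.List.insertBy]
  | y :: ys, hp => by
    rw [PySem.List.insertBy]
    have hy := (List.pairwise_cons.mp hp).1
    have hys := (List.pairwise_cons.mp hp).2
    split
    · rename_i hlt
      refine List.pairwise_cons.mpr ⟨?_, hp⟩
      intro z hz
      rcases List.mem_cons.mp hz with h | h
      · subst h; exact lt2_true_leP hlt
      · exact leP_trans (lt2_true_leP hlt) (hy z h)
    · rename_i hlt
      refine List.pairwise_cons.mpr ⟨?_, insertBy_lt2_pairwise x ys hys⟩
      intro z hz
      rcases (PySem.List.mem_insertBy lt2 x z ys).mp hz with h | h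
      · subst h; exact lt2_false_leP (by simpa using hlt)
      · exact hy z h

theorem foldl_insertBy_pairwise (l : List (Int × Int)) :
    ∀ acc : List (Int × Int), acc.Pairwise leP →
      (l.foldl (fun acc x => PySem.List.insertBy lt2 x acc) acc).Pairwise leP := by
  induction l with
  | nil => intro acc h; simpa using h
  | cons x l ih => intro acc h; exact ih _ (insertBy_lt2_pairwise x acc h)

-- A's loop (reused from the equality proof): the fold writes the sorted indices in order
-- and accumulates the weighted sum over the pairs
theorem procesos_loop (T : List Int) (n : Int) (l : List (Int × Int)) :
    ∀ (sol : List Int) (t : Int) (i : Nat), i + l.length ≤ sol.length →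
    l.foldl (procesosStep T n) (sol, t, i) =
      (sol.take i ++ l.map (·.2) ++ sol.drop (i + l.length),
       t + (l.map (fun p => (n - p.2 + 1) * PySem.List.pyGetD T p.2 0)).sum,
       i + l.length) := by
  induction l with
  | nil => intro sol t i h; simp
  | cons p l ih =>
    intro sol t i h
    simp only [List.foldl_cons, procesosStep]
    have hi : i < sol.length := by simp only [List.length_cons] at h; omega
    rw [ih _ _ _ (by rw [List.length_set]; simp only [List.length_cons] at h; omega)]
    simp only [List.map_cons, List.sum_cons, Prod.mk.injEq, List.length_cons]
    refine ⟨?_, by ring_nf, by omega⟩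
    rw [List.set_eq_take_append_cons_drop, if_pos hi]
    simp only [List.take_append, List.drop_append, List.length_take, Nat.min_eq_left hi.le,
      List.cons_append, List.append_assoc]
    have e1 : List.take (i + 1) (List.take i sol) = List.take i sol := by
      rw [List.take_take]; congr 1; omega
    have e2 : List.drop (i + 1 + l.length) (List.take i sol) = [] := by
      apply List.drop_eq_nil_of_le; simp only [List.length_take]; omega
    have e3 : i + 1 + l.length - i = l.length + 1 := by omega
    have e4 : i + 1 - i = 1 := by omega
    have e5 : i + 1 + l.length = i + (l.length + 1) := by omega
    rw [e1, e2, e3, List.drop_succ_cons, List.drop_drop, List.nil_append, e4, e5,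
      List.take_succ_cons, List.take_zero, List.singleton_append]

-- ===== VERDICT (by name: the statement is the Claim_ definition above) =====
theorem procesos_spec : Claim_equal_procesos := by
  intro T _
  show procesos T = procesos_alt T
  unfold procesos procesos_alt
  simp only []
  set n : Int := (T.length : Int) with hn
  set pairs := (PySem.List.pyRange 0 n 1).map (fun i => (PySem.List.pyGetD T i 0, i)) with hpairs
  set s := PySem.List.sorted2 pairs (·.1) (·.2) with hs
  have hperm : s.Perm pairs := PySem.List.sorted2_perm pairs _ _ false
  have hlen : s.length = T.length := by
    rw [hperm.length_eq, hpairs, List.length_map, PySem.List.length_pyRange_one]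
    simp [hn]
  -- the sorted list of pairs is pairwise lex-ordered
  have hps : s.Pairwise leP := by
    rw [hs]
    show (PySem.List.sorted2 pairs (·.1) (·.2) false).Pairwise leP
    unfold PySem.List.sorted2
    exact foldl_insertBy_pairwise pairs [] List.Pairwise.nil
  -- every pair in s has the shape (T[i], i)
  have hshape : ∀ p ∈ s, p.1 = PySem.List.pyGetD T p.2 0 := by
    intro p hp
    have := hperm.mem_iff.mp hp
    rw [hpairs] at this
    rcases List.mem_map.mp this with ⟨i, _, rfl⟩
    rfl
  -- hence the index projection is pairwise leI-sorted
  have hsolA_sorted : (s.map (·.2)).Pairwise (leI T) := by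
    rw [List.pairwise_map]
    refine hps.imp_of_mem ?_
    intro p q hp hq hle
    unfold leI
    rw [← hshape p hp, ← hshape q hq]
    exact hle
  -- and a permutation of range(n)
  have hsolA_perm : (s.map (·.2)).Perm (PySem.List.pyRange 0 n 1) := by
    have h0 : pairs.map (·.2) = PySem.List.pyRange 0 n 1 := by
      rw [hpairs, List.map_map]; simp [Function.comp_def]
    exact h0 ▸ (hperm.map _)
  -- both schedules are sorted permutations of range(n), so they are equal
  have hsol : s.map (·.2) = bMsort T (PySem.List.pyRange 0 n 1) := by
    exact List.Perm.eq_of_pairwise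
      (fun a b _ _ h1 h2 => leI_antisymm T h1 h2)
      hsolA_sorted (bMsort_sorted T _)
      (hsolA_perm.trans (bMsort_perm T _).symm)
  rw [procesos_loop T n s (List.replicate T.length 0) 0 0 (by simp [hlen])]
  have hsum : (s.map (fun p => (n - p.2 + 1) * PySem.List.pyGetD T p.2 0)).sum
      = ((PySem.List.enumerate T 0).foldl (fun acc p => acc + (n - p.1 + 1) * p.2) 0) := by
    rw [PySem.List.foldl_add (l := PySem.List.enumerate T) (g := fun p : Int × Int => (n - p.1 + 1) * p.2) (a := 0)]
    rw [(hperm.map _).sum_eq]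
    rw [PySem.List.enumerate_eq_map_pyRange (d := 0), hpairs]
    simp [PySem.List.len, Function.comp_def]
    rw [← hn]
  refine Prod.ext ?_ ?_
  · simp [hlen, hsol]
  · simpa using hsum
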